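-- pv_equiv track=rewrite | github.com/YusenZhang826/MOOC_Rec | getCourseHiraclass.py | filtconcepts
-- ===== SOURCE A (Python) =====
-- import collections
--
-- def filtconcepts(concepts):
--     """
--
--     :param concepts: 课程对应的概念
--     :return: 对概念筛选，保留出现频率最高的两种一级学科对应的概念
--     """
--     counter = collections.defaultdict(int)
--     for c in concepts:
--         subject = c.split('_')[-1]
--         counter[subject] += 1
--     sorted_subjects = sorted(counter.items(), key=lambda x: x[1], reverse=True)  # 按频次排序
--     if len(sorted_subjects) >= 2 :
--         top_subjects = [sorted_subjects[0][0], sorted_subjects[1][0]]  # 取频次前二的一级学科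
--     else:
--         return concepts
--
--     filter_concepts = []
--     for concept in concepts:
--         sub = concept.split('_')[-1]
--         if sub == top_subjects[0] or sub == top_subjects[1]:
--             filter_concepts.append(concept)
--     return filter_concepts
-- ===== SOURCE B (Python) =====
-- import collections
--
-- def filtconcepts(concepts):
--     counter = collections.defaultdict(int)
--     for c in concepts:
--         counter[c.split('_')[-1]] += 1
--     first = second = None
--     for subject, cnt in counter.items():
--         if first is None or cnt > first[1]:
--             first, second = (subject, cnt), first
--         elif second is None or cnt > second[1]:
--             second = (subject, cnt)
--     if second is None:
--         return concepts
--     t1, t2 = first[0], second[0]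
--     return [c for c in concepts if c.split('_')[-1] in (t1, t2)]
-- ===== Notes on version B (the rewrite author's own statement) =====
-- stated objective: alternative
-- what changed: Replaces the full descending sort of the subject counter with a single-pass strict-greater top-two scan over the counter items (ties resolved by insertion order, exactly as the stable sort does), and the output filter becomes a comprehension.
import Mathlib
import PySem

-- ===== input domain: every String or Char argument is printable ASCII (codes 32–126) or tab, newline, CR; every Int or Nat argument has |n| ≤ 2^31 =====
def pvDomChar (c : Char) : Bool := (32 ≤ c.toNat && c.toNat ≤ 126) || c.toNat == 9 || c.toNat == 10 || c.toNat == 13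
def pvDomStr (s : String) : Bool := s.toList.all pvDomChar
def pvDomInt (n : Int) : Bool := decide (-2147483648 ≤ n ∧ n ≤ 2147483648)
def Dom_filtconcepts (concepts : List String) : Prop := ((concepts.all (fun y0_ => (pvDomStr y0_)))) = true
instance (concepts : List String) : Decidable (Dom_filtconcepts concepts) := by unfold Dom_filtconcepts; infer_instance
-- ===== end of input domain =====

-- B replaces A's full descending sort of the subject counter by a single strict-greater
-- top-two scan over the counter items (objective: alternative selection algorithm).

-- c.split('_')[-1]  (split? with a nonempty separator is always some, and the list is nonempty,
-- so the getD defaults are never hit; exact on all strings)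
def pySubject (c : String) : String :=
  (PySem.List.pyGet? ((PySem.Str.split? c "_").getD []) (-1)).getD ""

-- ===== PORT A =====
def filtconcepts (concepts : List String) : List String :=
  let counter := concepts.foldl (fun d c => d.modify (pySubject c) (0 : Int) (· + 1)) (PySem.Dict.empty : PySem.Dict String Int)
  let sortedSubjects := PySem.List.sorted counter.items (fun p => p.2) true
  match sortedSubjects with
  | t0 :: t1 :: _ =>
    concepts.foldl (fun acc c =>
      if pySubject c = t0.1 ∨ pySubject c = t1.1 then acc ++ [c] else acc) []
  | _ => concepts

-- ===== PORT B =====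
-- one step of B's top-two scan ('first'/'second' with strict-greater updates)
def topStep (st : Option (String × Int) × Option (String × Int)) (p : String × Int) :
    Option (String × Int) × Option (String × Int) :=
  match st with
  | (none, _) => (some p, none)
  | (some a, s2) =>
    if a.2 < p.2 then (some p, some a)
    else
      match s2 with
      | none => (some a, some p)
      | some b => if b.2 < p.2 then (some a, some p) else (some a, some b)

def filtconcepts_alt (concepts : List String) : List String :=
  let counter := concepts.foldl (fun d c => d.modify (pySubject c) (0 : Int) (· + 1)) (PySem.Dict.empty : PySem.Dict String Int)
  match counter.items.foldl topStep (none, none) with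
  | (some a, some b) => concepts.filter (fun c => decide (pySubject c ∈ [a.1, b.1]))
  | _ => concepts

-- ===== PRECONDITION & SPEC =====
def Spec_filtconcepts (concepts : List String) (out : List String) : Prop := out = filtconcepts_alt concepts
instance (concepts : List String) (out : List String) : Decidable (Spec_filtconcepts concepts out) := by unfold Spec_filtconcepts; infer_instance

-- ===== CLAIM (what is proved, stated in full; the proofs are below) =====
def Claim_equal_filtconcepts : Prop := ∀ (concepts : List String), Dom_filtconcepts concepts → Spec_filtconcepts concepts (filtconcepts concepts)

-- ===== LEMMAS AND PROOFS =====

-- the first two elements of a list, as B's scan state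
def stateOf (l : List (String × Int)) : Option (String × Int) × Option (String × Int) :=
  match l with
  | [] => (none, none)
  | [a] => (some a, none)
  | a :: b :: _ => (some a, some b)

lemma stateOf_insertBy (x : String × Int) (acc : List (String × Int)) :
    stateOf (PySem.List.insertBy (fun a b => decide (b.2 < a.2)) x acc) =
      topStep (stateOf acc) x := by
  match acc with
  | [] => simp [PySem.List.insertBy, stateOf, topStep]
  | [a] =>
    simp only [PySem.List.insertBy, stateOf, topStep]
    by_cases h : a.2 < x.2 <;> simp [h]
  | a :: b :: t =>
    simp only [PySem.List.insertBy, stateOf, topStep]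
    by_cases h : a.2 < x.2
    · simp [h]
    · by_cases h2 : b.2 < x.2 <;> simp [h, h2]

lemma scan_eq_stateOf (l acc : List (String × Int)) :
    l.foldl topStep (stateOf acc) =
      stateOf (l.foldl (fun acc x => PySem.List.insertBy (fun a b => decide (b.2 < a.2)) x acc) acc) := by
  induction l generalizing acc with
  | nil => rfl
  | cons x xs ih =>
    simp only [List.foldl_cons, ← stateOf_insertBy x acc]
    exact ih _

lemma foldl_append_filter (p : String → Prop) [DecidablePred p] (l : List String) (acc : List String) :
    l.foldl (fun acc c => if p c then acc ++ [c] else acc) acc =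
      acc ++ l.filter (fun c => decide (p c)) := by
  induction l generalizing acc with
  | nil => simp
  | cons x xs ih =>
    by_cases h : p x <;> simp [h, ih]

-- ===== VERDICT (by name: the statement is the Claim_ definition above) =====
theorem filtconcepts_spec : Claim_equal_filtconcepts := by
  intro concepts _
  unfold Spec_filtconcepts filtconcepts filtconcepts_alt
  simp only
  set items := (concepts.foldl (fun d c => d.modify (pySubject c) (0 : Int) (· + 1)) (PySem.Dict.empty : PySem.Dict String Int)).items with hi
  have hscan : items.foldl topStep (none, none) =
      stateOf (PySem.List.sorted items (fun p => p.2) true) := by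
    rw [PySem.List.sorted_rev_eq_foldl_insertBy]
    exact scan_eq_stateOf items []
  rw [hscan]
  match h : PySem.List.sorted items (fun p => p.2) true with
  | [] => simp [stateOf]
  | [a] => simp [stateOf]
  | t0 :: t1 :: rest =>
    simp only [stateOf]
    rw [foldl_append_filter (fun c => pySubject c = t0.1 ∨ pySubject c = t1.1)]
    simp [List.mem_cons]
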